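-- pv_equiv track=rewrite | github.com/dgunruh/Elementary-Cellular-Automata | ECA_dgunruh.py | create_lookup_table
-- ===== SOURCE A (Python) =====
-- def create_lookup_table(rule_number):
--     '''
--     Create a ternary rule number and use to create our dictionary,
--     which maps neighborhoods to values
--
--     Inputs:
--     ---------------
--     rule_number: int
--         Positive integer specifying which rule to use
--
--     Outputs:
--     ---------------
--     lookup_table: dict
--         Dictionary mapping tuple neighborhoods to
--         int values (in the range 0-2)
--     '''
--     # create list of neighborhood tuples in lex. order
--     neighborhoods = [(0, 0), (0, 1), (0, 2), (1, 0),
--                      (1, 1), (1, 2), (2, 0), (2, 1), (2, 2)]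
--
--     # convert the rule number to ternary
--     in_ternary = ''
--     if rule_number == 0:
--         in_ternary = '0'
--     else:
--         nums = []
--         n = rule_number
--         while n:
--             n, r = divmod(n, 3)
--             nums.append(str(r))
--         in_ternary = ''.join(reversed(nums))
--
--     # reverse the rule number
--     in_ternary = in_ternary[::-1]
--
--     # pad the rule number with zeros
--     ternary_length = len(in_ternary)
--     if ternary_length != 9:
--         padding = 9 - ternary_length
--         in_ternary = in_ternary + '0' * padding
--
--     return dict(zip(neighborhoods, in_ternary))
-- ===== SOURCE B (Python) =====
-- def create_lookup_table(rule_number):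
--     neighborhoods = [(0, 0), (0, 1), (0, 2), (1, 0),
--                      (1, 1), (1, 2), (2, 0), (2, 1), (2, 2)]
--     return {nb: str((rule_number // 3 ** i) % 3)
--             for i, nb in enumerate(neighborhoods)}
-- ===== Notes on version B (the rewrite author's own statement) =====
-- stated objective: simpler
-- what changed: B replaces A's pipeline (build a ternary string by repeated divmod, reverse it, pad with zeros, zip with the neighborhoods) by a single dict comprehension that extracts each ternary digit positionally as str((rule_number // 3**i) % 3) for the i-th neighborhood.
import Mathlib
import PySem

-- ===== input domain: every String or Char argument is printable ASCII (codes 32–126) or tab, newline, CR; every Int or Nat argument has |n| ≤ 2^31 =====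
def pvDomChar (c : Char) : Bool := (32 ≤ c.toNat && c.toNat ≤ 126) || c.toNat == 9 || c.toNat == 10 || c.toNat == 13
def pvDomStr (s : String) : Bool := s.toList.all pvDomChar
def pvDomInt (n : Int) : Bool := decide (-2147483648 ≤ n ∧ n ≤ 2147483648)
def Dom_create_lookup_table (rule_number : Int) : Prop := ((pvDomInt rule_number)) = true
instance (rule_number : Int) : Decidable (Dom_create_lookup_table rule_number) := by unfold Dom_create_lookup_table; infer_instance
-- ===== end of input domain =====

-- B replaces A's ternary-string building (convert, reverse, pad) by extracting each
-- ternary digit positionally with (rule_number // 3**i) % 3; objective: simpler.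


-- ===== PORT A =====
-- the 'while n: n, r = divmod(n, 3); nums.append(str(r))' loop, producing the list of
-- digit strings (as char lists) least-significant first.  Python's loop runs while
-- n ≠ 0 and diverges for n < 0; the guard 0 < n makes the Lean recursion total and is
-- identical to Python's on Pre_ (0 ≤ rule_number).
def pvA_nums (n : Int) : List (List Char) :=
  if h : 0 < n then
    PySem.Int.toChars (PySem.Int.mod n 3) :: pvA_nums (PySem.Int.floordiv n 3)
  else []
termination_by n.toNat
decreasing_by
  have h3 : PySem.Int.floordiv n 3 = n / 3 := PySem.Int.floordiv_eq_ediv_of_pos (by omega)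
  rw [h3]; omega

def create_lookup_table (rule_number : Int) : List (Int × Int × String) :=
  let neighborhoods : List (Int × Int) :=
    [(0, 0), (0, 1), (0, 2), (1, 0), (1, 1), (1, 2), (2, 0), (2, 1), (2, 2)]
  -- strings are carried as List Char (''.join / [::-1] / '0'*padding are exact on lists)
  let in_ternary : List Char :=
    if rule_number = 0 then ['0']
    else ((pvA_nums rule_number).reverse).flatten   -- ''.join(reversed(nums))
  let in_ternary := in_ternary.reverse              -- in_ternary[::-1]
  let ternary_length : Int := in_ternary.length
  let in_ternary :=
    if ternary_length ≠ 9 then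
      -- '0' * padding; Python's s * k is '' for k ≤ 0, exactly List.replicate (9-len).toNat
      in_ternary ++ List.replicate ((9 - ternary_length).toNat) '0'
    else in_ternary
  -- dict(zip(neighborhoods, in_ternary)): keys are distinct, so the dict is the zipped
  -- association list in order; each char becomes a one-character string value
  (neighborhoods.zip in_ternary).map (fun p => (p.1.1, p.1.2, String.ofList [p.2]))

-- ===== PORT B =====
def create_lookup_table_alt (rule_number : Int) : List (Int × Int × String) :=
  let neighborhoods : List (Int × Int) :=
    [(0, 0), (0, 1), (0, 2), (1, 0), (1, 1), (1, 2), (2, 0), (2, 1), (2, 2)]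
  -- {nb: str((rule_number // 3**i) % 3) for i, nb in enumerate(neighborhoods)}
  (PySem.List.enumerate neighborhoods 0).map (fun p =>
    (p.2.1, p.2.2,
      PySem.Int.toStr (PySem.Int.mod (PySem.Int.floordiv rule_number ((3 : Int) ^ p.1.toNat)) 3)))

-- ===== PRECONDITION & SPEC =====
-- Pre_ excludes negative rule numbers: there Python A's while-loop never terminates
-- (divmod keeps n at -1), so A returns no value.
def Pre_create_lookup_table (rule_number : Int) : Prop := 0 ≤ rule_number
instance (rule_number : Int) : Decidable (Pre_create_lookup_table rule_number) := by
  unfold Pre_create_lookup_table; infer_instance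
def pvWitness_create_lookup_table : Int := 30

def Spec_create_lookup_table (rule_number : Int) (out : List (Int × Int × String)) : Prop := out = create_lookup_table_alt rule_number
instance (rule_number : Int) (out : List (Int × Int × String)) : Decidable (Spec_create_lookup_table rule_number out) := by unfold Spec_create_lookup_table; infer_instance

-- ===== CLAIM (what is proved, stated in full; the proofs are below) =====
def Claim_equal_create_lookup_table : Prop := ∀ (rule_number : Int), Dom_create_lookup_table rule_number → Pre_create_lookup_table rule_number → Spec_create_lookup_table rule_number (create_lookup_table rule_number)

-- ===== LEMMAS AND PROOFS =====

-- every entry of pvA_nums is a single digit character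
theorem pvA_nums_singleton (n : Int) : ∀ l ∈ pvA_nums n, ∃ c, l = [c] := by
  fun_induction pvA_nums n with
  | case1 n h ih =>
    intro l hl
    rcases List.mem_cons.mp hl with h' | h'
    · subst h'
      have h0 : 0 ≤ PySem.Int.mod n 3 := PySem.Int.mod_nonneg _ (by omega)
      have h3 : PySem.Int.mod n 3 < 3 := PySem.Int.mod_lt _ (by omega)
      interval_cases h' : (PySem.Int.mod n 3) <;> exact ⟨_, rfl⟩
    · exact ih l h'
  | case2 n h => intro l hl; simp at hl

-- character i (default '0') of the joined digit list is the i-th ternary digit of n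
theorem pvA_digit (i : Nat) : ∀ (n : Int), 0 ≤ n →
    [((pvA_nums n).flatten).getD i '0']
      = PySem.Int.toChars (PySem.Int.mod (PySem.Int.floordiv n ((3 : Int) ^ i)) 3) := by
  induction i with
  | zero =>
    intro n hn
    rw [pvA_nums]
    by_cases h : 0 < n
    · simp only [dif_pos h, List.flatten_cons]
      have h0 : 0 ≤ PySem.Int.mod n 3 := PySem.Int.mod_nonneg _ (by omega)
      have h3 : PySem.Int.mod n 3 < 3 := PySem.Int.mod_lt _ (by omega)
      have hfd : PySem.Int.floordiv n ((3:Int) ^ 0) = n := by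
        rw [PySem.Int.floordiv_eq_ediv_of_pos (by norm_num)]; simp
      rw [hfd]
      interval_cases h' : (PySem.Int.mod n 3) <;> rfl
    · have hn0 : n = 0 := by omega
      subst hn0; decide
  | succ i ih =>
    intro n hn
    rw [pvA_nums]
    by_cases h : 0 < n
    · simp only [dif_pos h, List.flatten_cons]
      have h0 : 0 ≤ PySem.Int.mod n 3 := PySem.Int.mod_nonneg _ (by omega)
      have h3 : PySem.Int.mod n 3 < 3 := PySem.Int.mod_lt _ (by omega)
      have hfd3 : PySem.Int.floordiv n 3 = n / 3 := PySem.Int.floordiv_eq_ediv_of_pos (by omega)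
      have hone : ∃ c, PySem.Int.toChars (PySem.Int.mod n 3) = [c] := by
        interval_cases h' : (PySem.Int.mod n 3) <;> exact ⟨_, rfl⟩
      obtain ⟨c, hc⟩ := hone
      rw [hc]
      have : ([c] ++ (pvA_nums (PySem.Int.floordiv n 3)).flatten).getD (i + 1) '0'
          = ((pvA_nums (PySem.Int.floordiv n 3)).flatten).getD i '0' := by simp
      rw [this, ih (PySem.Int.floordiv n 3) (by rw [hfd3]; omega)]
      congr 1
      rw [hfd3, PySem.Int.floordiv_eq_ediv_of_pos (by positivity),
        PySem.Int.floordiv_eq_ediv_of_pos (by positivity),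
        Int.ediv_ediv_of_nonneg (by norm_num), pow_succ, mul_comm]
    · have hn0 : n = 0 := by omega
      subst hn0
      simp only [dif_neg h, List.flatten_nil, List.getD_nil]
      have : PySem.Int.floordiv 0 ((3:Int) ^ (i+1)) = 0 := by
        rw [PySem.Int.floordiv_eq_ediv_of_pos (by positivity)]; simp
      rw [this]; rfl

-- the reversed join of the reversed digit list is just the join (all entries are singletons)
theorem pvA_join_reverse (n : Int) :
    ((pvA_nums n).reverse.flatten).reverse = (pvA_nums n).flatten := by
  rw [List.flatten_reverse, List.reverse_reverse]
  have hm : (pvA_nums n).map List.reverse = pvA_nums n := by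
    conv_rhs => rw [← List.map_id (pvA_nums n)]
    apply List.map_congr_left
    intro l hl
    obtain ⟨c, rfl⟩ := pvA_nums_singleton n l hl
    rfl
  rw [hm]

-- ===== VERDICT (by name: the statement is the Claim_ definition above) =====
theorem create_lookup_table_spec : Claim_equal_create_lookup_table := by
  intro n _ hpre
  unfold Spec_create_lookup_table
  by_cases h0 : n = 0
  · subst h0; decide
  · have hpos : 0 < n := by
      unfold Pre_create_lookup_table at hpre; omega
    unfold create_lookup_table create_lookup_table_alt
    simp only [if_neg h0, pvA_join_reverse]
    -- the padded char list: digits then zeros; its position-i char is getD i C '0'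
    set C : List Char := (pvA_nums n).flatten with hC
    have hdig : ∀ i : Nat,
        String.ofList [C.getD i '0']
          = PySem.Int.toStr (PySem.Int.mod (PySem.Int.floordiv n ((3 : Int) ^ i)) 3) := by
      intro i
      have := pvA_digit i n (le_of_lt hpos)
      rw [hC, this]
      exact (String.ofList_eq.mpr (PySem.Int.toList_toStr _).symm).symm
    -- padded list P and its indexing
    set P : List Char :=
      (if (C.length : Int) ≠ 9 then C ++ List.replicate ((9 - (C.length : Int)).toNat) '0' else C)
      with hP
    have hPget : ∀ i : Nat, i < 9 → P.getD i '0' = C.getD i '0' := by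
      intro i hi
      rw [hP]
      split
      · by_cases hic : i < C.length
        · rw [List.getD_eq_getElem?_getD, List.getElem?_append_left hic,
            ← List.getD_eq_getElem?_getD]
        · rw [List.getD_eq_getElem?_getD, List.getD_eq_getElem?_getD,
            List.getElem?_append_right (by omega)]
          simp only [List.getElem?_replicate, List.getElem?_eq_none (by omega : C.length ≤ i)]
          split <;> rfl
      · rfl
    have hPlen : 9 ≤ P.length := by
      rw [hP]
      split
      · rename_i hne
        by_cases hle : C.length ≤ 9
        · simp; omega
        · simp; omega
      · rename_i hne
        have : (C.length : Int) = 9 := by omega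
        omega
    clear_value C P
    -- decompose P into its first nine characters
    obtain ⟨a0, P1, rfl⟩ : ∃ a t, P = a :: t := List.exists_cons_of_ne_nil (by intro h; rw [h] at hPlen; simp at hPlen)
    obtain ⟨a1, P2, rfl⟩ : ∃ a t, P1 = a :: t := List.exists_cons_of_ne_nil (by intro h; subst h; simp at hPlen)
    obtain ⟨a2, P3, rfl⟩ : ∃ a t, P2 = a :: t := List.exists_cons_of_ne_nil (by intro h; subst h; simp at hPlen)
    obtain ⟨a3, P4, rfl⟩ : ∃ a t, P3 = a :: t := List.exists_cons_of_ne_nil (by intro h; subst h; simp at hPlen)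
    obtain ⟨a4, P5, rfl⟩ : ∃ a t, P4 = a :: t := List.exists_cons_of_ne_nil (by intro h; subst h; simp at hPlen)
    obtain ⟨a5, P6, rfl⟩ : ∃ a t, P5 = a :: t := List.exists_cons_of_ne_nil (by intro h; subst h; simp at hPlen)
    obtain ⟨a6, P7, rfl⟩ : ∃ a t, P6 = a :: t := List.exists_cons_of_ne_nil (by intro h; subst h; simp at hPlen)
    obtain ⟨a7, P8, rfl⟩ : ∃ a t, P7 = a :: t := List.exists_cons_of_ne_nil (by intro h; subst h; simp at hPlen)
    obtain ⟨a8, P9, rfl⟩ : ∃ a t, P8 = a :: t := List.exists_cons_of_ne_nil (by intro h; subst h; simp at hPlen)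
    simp only [List.zip_cons_cons, List.map_cons, PySem.List.enumerate_cons,
      PySem.List.enumerate_nil, List.zip_nil_left, List.map_nil]
    have hval : ∀ i : Nat, i < 9 →
        String.ofList [(a0 :: a1 :: a2 :: a3 :: a4 :: a5 :: a6 :: a7 :: a8 :: P9).getD i '0']
          = PySem.Int.toStr (PySem.Int.mod (PySem.Int.floordiv n ((3 : Int) ^ i)) 3) := by
      intro i hi; rw [hPget i hi, hdig i]
    refine List.ext_getElem (by simp) ?_
    intro k hk1 hk2
    simp only [List.length_cons, List.length_nil] at hk1
    interval_cases k <;>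
      · simp only [List.getElem_cons_zero, List.getElem_cons_succ]
        refine Prod.ext rfl (Prod.ext rfl ?_)
        first
        | exact (by simpa using hval 0 (by norm_num))
        | exact (by simpa using hval 1 (by norm_num))
        | exact (by simpa using hval 2 (by norm_num))
        | exact (by simpa using hval 3 (by norm_num))
        | exact (by simpa using hval 4 (by norm_num))
        | exact (by simpa using hval 5 (by norm_num))
        | exact (by simpa using hval 6 (by norm_num))
        | exact (by simpa using hval 7 (by norm_num))
        | exact (by simpa using hval 8 (by norm_num))
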